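-- pv_equiv track=rewrite | github.com/SuperChao781/Udarcity-Work | 机器学习入门/P1项目/Task3.py | get_num_in_brackets
-- ===== SOURCE A (Python) =====
-- def get_num_in_brackets(string):
-- #该函数提取一个字符串中第一个()内的内容，并返回
-- #例如 输入'(080)xxxx' 返回080
--     output = '';
--     for index in range(len(string)):
--         character = string[index];
--         if(character == '('):
--             continue;
--         elif(character == ')'):
--             break;
--         else:
--             output += character;
--     return output;
-- ===== SOURCE B (Python) =====
-- def get_num_in_brackets(string):
--     # prefix before the first ')' (whole string if none), with all '(' removed
--     return string.split(')')[0].replace('(', '')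
-- ===== Notes on version B (the rewrite author's own statement) =====
-- stated objective: idiomatic
-- what changed: Replaces the manual index loop with continue/break by a slice-then-filter decomposition: take the prefix before the first close-paren via split, then delete open-parens with replace; both passes run in C.
import Mathlib
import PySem

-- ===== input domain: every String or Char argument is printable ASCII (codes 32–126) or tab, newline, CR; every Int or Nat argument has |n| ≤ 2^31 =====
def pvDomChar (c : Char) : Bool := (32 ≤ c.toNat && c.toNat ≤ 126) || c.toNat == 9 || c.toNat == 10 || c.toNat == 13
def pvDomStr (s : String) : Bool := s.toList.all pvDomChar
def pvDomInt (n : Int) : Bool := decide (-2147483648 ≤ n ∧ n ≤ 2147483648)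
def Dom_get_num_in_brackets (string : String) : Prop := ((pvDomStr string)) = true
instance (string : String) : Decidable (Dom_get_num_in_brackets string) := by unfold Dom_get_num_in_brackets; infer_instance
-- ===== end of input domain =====

-- B replaces A's per-character loop with continue/break by split(')')[0] followed by replace('(',''): idiomatic, same cost.

-- ===== PORT A =====
-- the for-loop over string[index] with continue/break, output built by +=
def getNumLoop : List Char → String → String
  | [], output => output
  | character :: rest, output =>
    if character = '(' then getNumLoop rest output
    else if character = ')' then output
    else getNumLoop rest (output ++ character.toString)

def get_num_in_brackets (string : String) : String :=
  getNumLoop string.toList ""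

-- ===== PORT B =====
def get_num_in_brackets_alt (string : String) : String :=
  match PySem.Str.split? string ")" with
  | some parts => PySem.Str.replace ((PySem.List.pyGet? parts 0).getD "") "(" ""
  | none => ""  -- unreachable: the separator ")" is nonempty

-- ===== PRECONDITION & SPEC =====
def Spec_get_num_in_brackets (string : String) (out : String) : Prop := out = get_num_in_brackets_alt string
instance (string : String) (out : String) : Decidable (Spec_get_num_in_brackets string out) := by unfold Spec_get_num_in_brackets; infer_instance

-- ===== CLAIM (what is proved, stated in full; the proofs are below) =====
def Claim_equal_get_num_in_brackets : Prop := ∀ (string : String), Dom_get_num_in_brackets string → Spec_get_num_in_brackets string (get_num_in_brackets string)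

-- ===== LEMMAS AND PROOFS =====

-- A's loop = prefix before the first ')' with '(' filtered out
theorem getNumLoop_eq (l : List Char) (out : String) :
    getNumLoop l out = out ++ String.ofList ((l.takeWhile (· ≠ ')')).filter (· ≠ '(')) := by
  induction l generalizing out with
  | nil => simp [getNumLoop]
  | cons c rest ih =>
    by_cases h1 : c = '('
    · subst h1; simp [getNumLoop, ih]
    · by_cases h2 : c = ')'
      · subst h2; simp [getNumLoop]
      · simp only [getNumLoop, ih, List.takeWhile_cons, decide_eq_true_eq, h1, h2]
        apply String.toList_inj.mp
        simp [h1, h2]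

-- splitOn.go pulls its accumulator out in front
theorem splitOn_go_acc (sep : List Char) (fuel : Nat) :
    ∀ (l cur : List Char) (acc : List (List Char)),
      PySem.Chars.splitOn.go sep fuel l cur acc =
        acc.reverse ++ PySem.Chars.splitOn.go sep fuel l cur [] := by
  induction fuel with
  | zero => intro l cur acc; simp [PySem.Chars.splitOn.go]
  | succ n ih =>
    intro l cur acc
    cases l with
    | nil => simp [PySem.Chars.splitOn.go]
    | cons c rest =>
      simp only [PySem.Chars.splitOn.go]
      split
      · rw [ih _ _ (cur.reverse :: acc), ih _ _ [cur.reverse]]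
        simp
      · exact ih _ _ _

-- the first piece of a single-character split is the takeWhile prefix
theorem splitOn_go_head (ch : Char) (fuel : Nat) :
    ∀ (l cur : List Char), l.length ≤ fuel →
      ∃ r, PySem.Chars.splitOn.go [ch] fuel l cur [] =
        (cur.reverse ++ l.takeWhile (· ≠ ch)) :: r := by
  induction fuel with
  | zero =>
    intro l cur h
    have : l = [] := List.eq_nil_of_length_eq_zero (Nat.le_zero.mp h)
    subst this
    exact ⟨[], by simp [PySem.Chars.splitOn.go]⟩
  | succ n ih =>
    intro l cur h
    cases l with
    | nil => exact ⟨[], by simp [PySem.Chars.splitOn.go]⟩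
    | cons c rest =>
      simp only [PySem.Chars.splitOn.go]
      by_cases hc : c = ch
      · subst hc
        rw [if_pos (by simp [List.isPrefixOf])]
        rw [splitOn_go_acc]
        exact ⟨PySem.Chars.splitOn.go [c] n (List.drop 1 (c :: rest)) [] [], by simp⟩
      · rw [if_neg (by simp [List.isPrefixOf]; exact fun h' => hc h'.symm)]
        obtain ⟨r, hr⟩ := ih rest (c :: cur) (by simpa using Nat.le_of_succ_le_succ h)
        refine ⟨r, ?_⟩
        rw [hr]
        simp [hc]
      
-- replacing a single character by nothing is a filter
theorem replace_go_filter (ch : Char) (fuel : Nat) :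
    ∀ (l acc : List Char), l.length ≤ fuel →
      PySem.Chars.replace.go [ch] [] fuel l acc = acc.reverse ++ l.filter (· ≠ ch) := by
  induction fuel with
  | zero =>
    intro l acc h
    have : l = [] := List.eq_nil_of_length_eq_zero (Nat.le_zero.mp h)
    subst this; simp [PySem.Chars.replace.go]
  | succ n ih =>
    intro l acc h
    cases l with
    | nil => simp [PySem.Chars.replace.go]
    | cons c rest =>
      simp only [PySem.Chars.replace.go]
      by_cases hc : c = ch
      · subst hc
        rw [if_pos (by simp [List.isPrefixOf])]
        rw [ih _ _ (by simpa using Nat.le_of_succ_le_succ h)]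
        simp
      · rw [if_neg (by simp [List.isPrefixOf]; exact fun h' => hc h'.symm)]
        rw [ih _ _ (by simpa using Nat.le_of_succ_le_succ h)]
        simp [hc]

theorem chars_replace_filter (ch : Char) (l : List Char) :
    PySem.Chars.replace l [ch] [] = l.filter (· ≠ ch) := by
  simp only [PySem.Chars.replace, List.isEmpty_cons]
  rw [replace_go_filter ch l.length l [] le_rfl]
  simp

theorem alt_eq (s : String) :
    get_num_in_brackets_alt s =
      String.ofList ((s.toList.takeWhile (· ≠ ')')).filter (· ≠ '(')) := by
  obtain ⟨r, hr⟩ := splitOn_go_head ')' (s.toList.length + 1) s.toList []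
    (Nat.le_succ _)
  simp only [get_num_in_brackets_alt, PySem.Str.split?, PySem.Chars.split?]
  rw [if_neg (by simp)]
  simp only [Option.map_some]
  have htl : (")" : String).toList = [')'] := rfl
  rw [htl]
  unfold PySem.Chars.splitOn
  rw [hr]
  simp only [List.reverse_nil, List.nil_append, List.map_cons]
  have h0 : PySem.List.pyGet?
      (String.ofList (s.toList.takeWhile (· ≠ ')')) :: List.map String.ofList r) (0 : Int)
      = some (String.ofList (s.toList.takeWhile (· ≠ ')'))) := by
    simp [PySem.List.pyGet?, PySem.List.pyIdx?]
  rw [h0]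
  simp only [Option.getD_some]
  simp only [PySem.Str.replace]
  have : (("(" : String)).toList = ['('] := rfl
  simp [this, chars_replace_filter]

-- ===== VERDICT (by name: the statement is the Claim_ definition above) =====
theorem get_num_in_brackets_spec : Claim_equal_get_num_in_brackets := by
  intro s _
  unfold Spec_get_num_in_brackets
  rw [alt_eq]
  unfold get_num_in_brackets
  rw [getNumLoop_eq]
  simp
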